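-- pv_equiv track=rewrite | github.com/qigepomingtaimafan/onlineCodingSystem | demosite/polls/views.py | decodeJSONtoArray
-- ===== SOURCE A (Python) =====
-- def decodeJSONtoArray(str):
--     arr = []
--     tmp = ""
--     start = False
--     for c in str:
--         if c == '\"' and not start:
--             start = True
--             continue
--         if start:
--             if c == '\"':
--                 start = False
--                 arr.append(tmp)
--                 tmp = ""
--                 continue
--             else:
--                 tmp += c
--         if c == ']':
--             break
--     return arr
-- ===== SOURCE B (Python) =====
-- def decodeJSONtoArray(str):
--     idx = str.find(']')
--     if idx != -1:
--         str = str[:idx]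
--     parts = str.split('"')
--     return parts[1:-1:2]
-- ===== Notes on version B (the rewrite author's own statement) =====
-- stated objective: simpler
-- what changed: Replaced the per-character open/close quote state machine with: truncate at the first ']' (str.find + slice), split on the double-quote character, and return the odd-index parts up to the last complete quote pair (parts[1:-1:2]).
import Mathlib
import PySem

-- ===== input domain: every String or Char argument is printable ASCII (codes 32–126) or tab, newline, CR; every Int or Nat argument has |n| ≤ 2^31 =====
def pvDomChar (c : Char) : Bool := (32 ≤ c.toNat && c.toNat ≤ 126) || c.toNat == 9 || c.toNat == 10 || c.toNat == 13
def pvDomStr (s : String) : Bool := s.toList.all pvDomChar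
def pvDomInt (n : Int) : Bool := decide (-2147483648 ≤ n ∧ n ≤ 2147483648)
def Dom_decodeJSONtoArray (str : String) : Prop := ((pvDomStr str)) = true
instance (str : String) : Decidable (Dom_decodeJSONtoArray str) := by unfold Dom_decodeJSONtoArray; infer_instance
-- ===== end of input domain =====

-- ===== PORT A =====
-- B replaces A's per-character open/close state machine by "truncate at the first ']',
-- split on '"', keep the odd-index parts up to the last complete pair" (objective: idiomatic).
-- loopA is the literal transliteration of A's for-loop: state (arr, tmp, start), break at ']'.
def loopA (cs : List Char) (arr : List String) (tmp : List Char) (start : Bool) : List String :=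
  match cs with
  | [] => arr
  | c :: rest =>
    if c = '"' ∧ start = false then loopA rest arr tmp true
    else
      if start then
        if c = '"' then loopA rest (arr ++ [String.ofList tmp]) [] false
        else
          -- tmp += c, then the ']' check
          if c = ']' then arr else loopA rest arr (tmp ++ [c]) start
      else
        if c = ']' then arr else loopA rest arr tmp start

def decodeJSONtoArray (str : String) : List String :=
  loopA str.toList [] [] false

-- ===== PORT B =====
-- transliteration of Source B: idx = str.find(']'); if idx != -1: str = str[:idx];
-- parts = str.split('"'); return parts[1:-1:2]
def decodeJSONtoArray_alt (str : String) : List String :=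
  let idx := PySem.Str.find str "]"
  let s := if idx ≠ -1 then PySem.Str.slice str none (some idx) else str
  match PySem.Str.split? s "\"" with          -- the separator "\"" is nonempty, so never none
  | none => []
  | some parts =>
    match PySem.List.slice? parts (some 1) (some (-1)) 2 with   -- step 2 ≠ 0, so never none
    | none => []
    | some r => r

-- ===== PRECONDITION & SPEC =====
def Spec_decodeJSONtoArray (str : String) (out : List String) : Prop := out = decodeJSONtoArray_alt str
instance (str : String) (out : List String) : Decidable (Spec_decodeJSONtoArray str out) := by unfold Spec_decodeJSONtoArray; infer_instance

-- ===== CLAIM (what is proved, stated in full; the proofs are below) =====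
def Claim_equal_decodeJSONtoArray : Prop := ∀ (str : String), Dom_decodeJSONtoArray str → Spec_decodeJSONtoArray str (decodeJSONtoArray str)

-- ===== LEMMAS AND PROOFS =====

-- structural form of splitting on '"'
def splitQ (cs : List Char) : List (List Char) :=
  match cs with
  | [] => [[]]
  | c :: rest =>
    if c = '"' then [] :: splitQ rest
    else
      match splitQ rest with
      | [] => [[c]]            -- unreachable: splitQ is never []
      | p :: ps => (c :: p) :: ps

-- the odd-index parts that are followed by at least one more part (= complete quoted chunks)
def oddMid {α : Type} : List α → List α
  | _ :: p :: x :: ps => p :: oddMid (x :: ps)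
  | _ => []

-- like oddMid on ([] :: parts) but with tmp prepended to the first chunk (open-string state)
def oddMidT (tmp : List Char) : List (List Char) → List (List Char)
  | p :: x :: ps => (tmp ++ p) :: oddMid (x :: ps)
  | _ => []

lemma splitQ_ne_nil (cs : List Char) : splitQ cs ≠ [] := by
  cases cs with
  | nil => simp [splitQ]
  | cons c rest =>
    simp only [splitQ]
    split
    · simp
    · split <;> simp

lemma oddMid_cons_eq {α : Type} (y y' : α) (l : List α) : oddMid (y :: l) = oddMid (y' :: l) := by
  cases l with
  | nil => rfl
  | cons b m => cases m with
    | nil => rfl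
    | cons b2 m2 => rfl

lemma oddMid_map {α β : Type} (f : α → β) : ∀ (l : List α),
    oddMid (l.map f) = (oddMid l).map f
  | [] => rfl
  | [_] => rfl
  | [_, _] => rfl
  | a :: p :: x :: ps => by
      simp only [List.map_cons, oddMid]
      exact congrArg _ (oddMid_map f (x :: ps))

-- A's loop stops at the first ']' exactly as truncation does
lemma loopA_trunc (cs : List Char) : ∀ arr tmp start,
    loopA cs arr tmp start = loopA (cs.takeWhile (· ≠ ']')) arr tmp start := by
  induction cs with
  | nil => intro arr tmp start; rfl
  | cons c rest ih =>
    intro arr tmp start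
    by_cases hc : c = ']'
    · subst hc
      simp only [loopA, List.takeWhile]
      norm_num
      rcases start with _ | _ <;> simp [loopA]
    · simp only [List.takeWhile]
      have : (decide (c ≠ ']')) = true := by simp [hc]
      rw [this]
      simp only [loopA]
      split
      · exact ih _ _ _
      · split
        · split
          · exact ih _ _ _
          · exact ih _ _ _
        · exact ih _ _ _

-- A's loop on a ']'-free string computes the complete quoted chunks of splitQ
lemma loopA_splitQ : ∀ (t : List Char), ']' ∉ t →
    (∀ arr, loopA t arr [] false = arr ++ (oddMid (splitQ t)).map String.ofList) ∧
    (∀ arr tmp, loopA t arr tmp true = arr ++ (oddMidT tmp (splitQ t)).map String.ofList) := by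
  intro t
  induction t with
  | nil =>
    intro _
    constructor
    · intro arr; simp [loopA, splitQ, oddMid]
    · intro arr tmp; simp [loopA, splitQ, oddMidT]
  | cons c rest ih =>
    intro hmem
    have hc' : c ≠ ']' := fun h => hmem (h ▸ List.mem_cons_self ..)
    have hrest : ']' ∉ rest := fun h => hmem (List.mem_cons_of_mem _ h)
    obtain ⟨ihf, iht⟩ := ih hrest
    obtain ⟨p, ps, hq⟩ : ∃ p ps, splitQ rest = p :: ps := by
      rcases h : splitQ rest with _ | ⟨p, ps⟩
      · exact absurd h (splitQ_ne_nil rest)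
      · exact ⟨p, ps, rfl⟩
    constructor
    · intro arr
      by_cases hc : c = '"'
      · subst hc
        have h1 : loopA ('"' :: rest) arr [] false = loopA rest arr [] true := by
          simp [loopA]
        rw [h1, iht arr []]
        have h2 : splitQ ('"' :: rest) = [] :: splitQ rest := by simp [splitQ]
        rw [h2, hq]
        rcases ps with _ | ⟨x, ps'⟩
        · simp [oddMid, oddMidT]
        · simp [oddMid, oddMidT]
      · have h1 : loopA (c :: rest) arr [] false = loopA rest arr [] false := by
          simp [loopA, hc, hc']
        rw [h1, ihf arr]
        have h2 : splitQ (c :: rest) = (c :: p) :: ps := by simp [splitQ, hc, hq]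
        rw [h2, hq, oddMid_cons_eq (c :: p) p]
    · intro arr tmp
      by_cases hc : c = '"'
      · subst hc
        have h1 : loopA ('"' :: rest) arr tmp true
            = loopA rest (arr ++ [String.ofList tmp]) [] false := by
          simp [loopA]
        rw [h1, ihf (arr ++ [String.ofList tmp])]
        have h2 : splitQ ('"' :: rest) = [] :: splitQ rest := by simp [splitQ]
        rw [h2, hq]
        rcases ps with _ | ⟨x, ps'⟩
        · simp [oddMid, oddMidT]
        · simp [oddMidT]
      · have h1 : loopA (c :: rest) arr tmp true = loopA rest arr (tmp ++ [c]) true := by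
          simp [loopA, hc, hc']
        rw [h1, iht arr (tmp ++ [c])]
        have h2 : splitQ (c :: rest) = (c :: p) :: ps := by simp [splitQ, hc, hq]
        rw [h2, hq]
        rcases ps with _ | ⟨x, ps'⟩
        · simp [oddMidT]
        · simp [oddMidT]

-- B-side: PySem's find of a single character, characterised
lemma find_go_char (c : Char) : ∀ (cs : List Char) (k : Nat),
    PySem.Chars.find.go [c] cs k
      = if c ∈ cs then (k : Int) + ((cs.takeWhile (· ≠ c)).length : Int) else -1
  | [], k => by simp [PySem.Chars.find.go]
  | b :: t, k => by
      rw [PySem.Chars.find.go]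
      by_cases hb : b = c
      · subst hb
        simp [List.isPrefixOf, List.takeWhile]
      · have h1 : [c].isPrefixOf (b :: t) = false := by
          simp [List.isPrefixOf]; exact fun h => absurd h.symm hb
        rw [h1]
        simp only [Bool.false_eq_true, if_false]
        rw [find_go_char c t (k+1)]
        have htw : (b :: t).takeWhile (· ≠ c) = b :: t.takeWhile (· ≠ c) := by
          simp [List.takeWhile, hb]
        rw [htw]
        by_cases hcm : c ∈ t
        · simp [hcm, Ne.symm hb]; omega
        · simp [hcm, Ne.symm hb]

-- Source B's "truncate at the first ']'" is takeWhile
lemma trunc_eq_takeWhile (cs : List Char) :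
    (if PySem.Chars.find cs "]".toList ≠ -1
      then PySem.List.slice cs none (some (PySem.Chars.find cs "]".toList)) else cs)
      = cs.takeWhile (· ≠ ']') := by
  have hfind : PySem.Chars.find cs "]".toList
      = if ']' ∈ cs then ((cs.takeWhile (· ≠ ']')).length : Int) else -1 := by
    simpa [PySem.Chars.find] using find_go_char ']' cs 0
  by_cases hm : ']' ∈ cs
  · rw [hfind]
    simp only [hm, if_true]
    have hne : (((cs.takeWhile (· ≠ ']')).length : Int)) ≠ -1 := by omega
    rw [if_pos hne, PySem.List.slice_to_natCast]
    exact ((List.prefix_iff_eq_take.mp (List.takeWhile_prefix _))).symm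
  · rw [hfind]
    simp [hm]
    exact (List.takeWhile_eq_self_iff ..).mpr (fun x hx => by simp; rintro rfl; exact hm hx) |>.symm

-- B-side: PySem's split on '"' is splitQ
lemma splitOn_go_eq : ∀ (fuel : Nat) (l cur : List Char) (acc : List (List Char)),
    l.length ≤ fuel →
    PySem.Chars.splitOn.go ['"'] fuel l cur acc =
      acc.reverse ++ (match splitQ l with
                      | [] => []
                      | p :: ps => (cur.reverse ++ p) :: ps)
  | 0, l, cur, acc => by
      intro h
      have : l = [] := by cases l <;> simp_all
      subst this
      simp [PySem.Chars.splitOn.go, splitQ]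
  | Nat.succ fuel, [], cur, acc => by
      intro h
      simp [PySem.Chars.splitOn.go, splitQ]
  | Nat.succ fuel, c :: rest, cur, acc => by
      intro h
      rw [PySem.Chars.splitOn.go]
      by_cases hc : c = '"'
      · subst hc
        have hpre : (['"'] : List Char).isPrefixOf ('"' :: rest) = true := by
          simp [List.isPrefixOf]
        rw [if_pos hpre]
        rw [show List.drop (['"'] : List Char).length ('"' :: rest) = rest from rfl]
        rw [splitOn_go_eq fuel rest [] ((cur.reverse) :: acc) (by simpa using h)]
        rcases hq : splitQ rest with _ | ⟨p, ps⟩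
        · exact absurd hq (splitQ_ne_nil rest)
        · simp [splitQ, hq]
      · have hpre : (['"'] : List Char).isPrefixOf (c :: rest) = false := by
          simp [List.isPrefixOf]; exact fun h' => absurd h'.symm hc
        rw [if_neg (by simp [hpre])]
        rw [splitOn_go_eq fuel rest (c :: cur) acc (by simpa using h)]
        rcases hq : splitQ rest with _ | ⟨p, ps⟩
        · exact absurd hq (splitQ_ne_nil rest)
        · simp [splitQ, hq, hc]

lemma splitOn_eq_splitQ (cs : List Char) :
    PySem.Chars.splitOn cs ['"'] = splitQ cs := by
  rw [PySem.Chars.splitOn, splitOn_go_eq (cs.length + 1) cs [] [] (by omega)]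
  rcases hq : splitQ cs with _ | ⟨p, ps⟩
  · exact absurd hq (splitQ_ne_nil cs)
  · simp

-- B-side: parts[1:-1:2], first as an explicit filterMap, then as oddMid
lemma slice?_odd_fm {α : Type} (xs : List α) :
    PySem.List.slice? xs (some 1) (some (-1)) 2
      = some ((List.range ((xs.length - 1)/2)).filterMap (fun k => xs[1 + 2*k]?)) := by
  cases xs with
  | nil => simp [PySem.List.slice?, PySem.List.sliceIndices]
  | cons a t =>
    simp only [PySem.List.slice?, PySem.List.sliceIndices]
    norm_num
    have hidx : ∀ k : Nat, ((1:Int) + 2*↑k).toNat = 1 + 2*k := by intro k; omega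
    have hcnt : (if 1 < t.length then (((↑t.length:Int) - 1 + 2 - 1) / 2).toNat else 0)
        = t.length / 2 := by split <;> omega
    simp only [hcnt, hidx]

lemma fm_oddMid {α : Type} : ∀ (xs : List α),
    (List.range ((xs.length - 1)/2)).filterMap (fun k => xs[1 + 2*k]?) = oddMid xs
  | [] => by simp [oddMid]
  | [_] => by simp [oddMid]
  | [_, _] => by simp [oddMid]
  | a :: p :: x :: ps => by
      have ih := fm_oddMid (x :: ps)
      have hlen : ((a :: p :: x :: ps).length - 1)/2 = (((x :: ps).length - 1)/2) + 1 := by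
        simp; omega
      rw [hlen, List.range_succ_eq_map, List.filterMap_cons, List.filterMap_map]
      have hf : (fun k => (a :: p :: x :: ps)[1 + 2*(Nat.succ k)]?)
          = (fun k : Nat => (x :: ps)[1+2*k]?) := by
        funext k
        have h2 : 1 + 2*(Nat.succ k) = (1 + 2*k) + 1 + 1 := by omega
        rw [h2, List.getElem?_cons_succ, List.getElem?_cons_succ]
      simp only [Function.comp_def]
      rw [show ((fun k => (a :: p :: x :: ps)[1 + 2 * Nat.succ k]?)
            = fun k : Nat => (x :: ps)[1+2*k]?) from hf]
      simp only [oddMid]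
      exact congrArg _ ih

lemma slice?_oddMid {α : Type} (xs : List α) :
    PySem.List.slice? xs (some 1) (some (-1)) 2 = some (oddMid xs) := by
  rw [slice?_odd_fm]
  exact congrArg some (fm_oddMid xs)

-- ===== VERDICT (by name: the statement is the Claim_ definition above) =====
theorem decodeJSONtoArray_spec : Claim_equal_decodeJSONtoArray := by
  intro str _
  unfold Spec_decodeJSONtoArray decodeJSONtoArray decodeJSONtoArray_alt
  -- name the truncated character list
  set tw := str.toList.takeWhile (· ≠ ']') with htw
  have hnb : ']' ∉ tw := by
    intro h
    have := List.mem_takeWhile_imp h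
    simp at this
  -- A's side
  rw [loopA_trunc str.toList [] [] false, ← htw]
  rw [(loopA_splitQ tw hnb).1 []]
  simp only [List.nil_append]
  -- B's side: the truncated string s has s.toList = tw
  have hs : (if PySem.Str.find str "]" ≠ -1
      then PySem.Str.slice str none (some (PySem.Str.find str "]")) else str).toList = tw := by
    have key := trunc_eq_takeWhile str.toList
    by_cases h : PySem.Str.find str "]" ≠ -1
    · rw [if_pos h]
      rw [if_pos (by simpa [PySem.Str.find] using h)] at key
      rw [htw, ← key]
      simp [PySem.Str.slice, PySem.Chars.slice, PySem.Str.find]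
    · rw [if_neg h]
      rw [if_neg (by simpa [PySem.Str.find] using h)] at key
      rw [htw, ← key]
  rw [show PySem.Str.split? (if PySem.Str.find str "]" ≠ -1
      then PySem.Str.slice str none (some (PySem.Str.find str "]")) else str) "\""
      = some (((splitQ tw).map String.ofList)) from ?_]
  · dsimp only
    rw [slice?_oddMid]
    dsimp only
    rw [oddMid_map]
  · rw [PySem.Str.split?]
    rw [PySem.Chars.split?]
    rw [if_neg (by simp)]
    rw [hs]
    rw [show ("\"".toList : List Char) = ['"'] from rfl]
    rw [splitOn_eq_splitQ]
    rfl
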